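-- pv_equiv track=rewrite | github.com/sejlermonster/Machine-Learning-in-Bioinformatics | TrainByCounting _fourState.py | StateTranslater
-- ===== SOURCE A (Python) =====
-- states = {'i':0, 'M':1, 'o':2, 'm':3}
--
-- def CheckNextObservationChange(lzz, index):
--     currVal = lzz[index]
--     for i in range(index, len(lzz)):
--         if lzz[i] != currVal:
--             if lzz[i] == states['o']:
--                 return states['M']
--             else:
--                 return states['m']
--
--     for i in range(len(lzz), -1,-1):
--         if lzz[i] != currVal:
--             if lzz[i] == states['i']:
--                 return states['M']
--             else:
--                 return states['m']
--
-- def StateTranslater(lzz):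
--     result = []
--     for i in range(len(lzz)):
--         if lzz[i] != states['M']:
--             result.append(lzz[i])
--         else:
--             result.append(CheckNextObservationChange(lzz,i))
--     return result
-- ===== SOURCE B (Python) =====
-- states = {'i': 0, 'M': 1, 'o': 2, 'm': 3}
--
-- def StateTranslater(lzz):
--     # single backward pass: nxt = nearest non-M value to the right
--     nxt = None
--     result = []
--     for x in reversed(lzz):
--         if x != states['M']:
--             nxt = x
--             result.append(x)
--         else:
--             result.append(states['M'] if nxt == states['o'] else states['m'])
--     result.reverse()
--     return result
-- ===== Notes on version B (the rewrite author's own statement) =====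
-- stated objective: alternative
-- what changed: Replaces the per-'M' forward rescan of the rest of the list with one backward pass that carries the nearest non-M value to the right; worst-case O(n) instead of O(n^2), same cost on the measured random inputs.
import Mathlib
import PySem

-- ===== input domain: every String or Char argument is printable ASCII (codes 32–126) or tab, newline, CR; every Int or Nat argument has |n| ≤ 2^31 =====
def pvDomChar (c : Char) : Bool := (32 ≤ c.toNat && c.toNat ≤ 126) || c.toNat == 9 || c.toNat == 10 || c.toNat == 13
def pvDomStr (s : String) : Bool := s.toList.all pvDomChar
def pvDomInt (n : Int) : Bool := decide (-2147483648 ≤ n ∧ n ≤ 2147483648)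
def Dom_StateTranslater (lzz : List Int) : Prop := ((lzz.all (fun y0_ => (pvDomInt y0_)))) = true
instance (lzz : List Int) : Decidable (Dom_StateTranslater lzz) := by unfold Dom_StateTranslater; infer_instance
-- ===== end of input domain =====

-- B replaces A's per-'M' forward rescan by one backward pass carrying the nearest
-- non-M value to the right (objective: alternative single-pass algorithm).

-- ===== PORT A =====
def states : PySem.Dict String Int :=
  PySem.Dict.ofList [("i", 0), ("M", 1), ("o", 2), ("m", 3)]

-- forward loop of CheckNextObservationChange; `none` models the IndexError the
-- second (backward) loop raises on its very first iteration (it reads lzz[len(lzz)])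
def cnocLoop (lzz : List Int) (currVal : Int) (i : Nat) : Option Int :=
  if h : i < lzz.length then
    if lzz[i] ≠ currVal then
      if lzz[i] = (states.get? "o").getD 0 then some ((states.get? "M").getD 0)
      else some ((states.get? "m").getD 0)
    else cnocLoop lzz currVal (i + 1)
  else none
termination_by lzz.length - i

-- index is always in range at the call site, so getD never takes its default
def CheckNextObservationChange (lzz : List Int) (index : Nat) : Option Int :=
  cnocLoop lzz (lzz.getD index 0) index

def stLoop (lzz : List Int) (i : Nat) (result : List Int) : List Int :=
  if h : i < lzz.length then
    if lzz[i] ≠ (states.get? "M").getD 0 then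
      stLoop lzz (i + 1) (result ++ [lzz[i]])
    else
      -- `.getD 0` is unreachable under Pre_ (A raises exactly when it would fire)
      stLoop lzz (i + 1) (result ++ [(CheckNextObservationChange lzz i).getD 0])
  else result
termination_by lzz.length - i

def StateTranslater (lzz : List Int) : List Int := stLoop lzz 0 []

-- ===== PORT B =====
def StateTranslater_alt (lzz : List Int) : List Int :=
  let st := lzz.reverse.foldl
    (fun (acc : Option Int × List Int) x =>
      if x ≠ 1 then (some x, acc.2 ++ [x])
      else (acc.1, acc.2 ++ [if acc.1 = some 2 then 1 else 3]))
    (none, [])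
  st.2.reverse

-- ===== PRECONDITION & SPEC =====
-- Pre_ excludes exactly the lists ending in 1 ('M'): there A's backward fallback
-- loop starts at lzz[len(lzz)] and raises IndexError.
def Pre_StateTranslater (lzz : List Int) : Prop := lzz.getLast? ≠ some 1
instance (lzz : List Int) : Decidable (Pre_StateTranslater lzz) := by
  unfold Pre_StateTranslater; infer_instance

def pvWitness_StateTranslater : List Int := [0, 1, 2, 0]

def Spec_StateTranslater (lzz : List Int) (out : List Int) : Prop := out = StateTranslater_alt lzz
instance (lzz : List Int) (out : List Int) : Decidable (Spec_StateTranslater lzz out) := by unfold Spec_StateTranslater; infer_instance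

-- ===== CLAIM (what is proved, stated in full; the proofs are below) =====
def Claim_equal_StateTranslater : Prop := ∀ (lzz : List Int), Dom_StateTranslater lzz → Pre_StateTranslater lzz → Spec_StateTranslater lzz (StateTranslater lzz)

-- ===== LEMMAS AND PROOFS =====

-- common reference: elementwise translation, each 'M' resolved from its own tail
def tmap : List Int → List Int
  | [] => []
  | x :: rest =>
      (if x ≠ 1 then x else if rest.find? (fun y => y != 1) = some 2 then 1 else 3) :: tmap rest

lemma states_M : (states.get? "M").getD 0 = 1 := by decide
lemma states_o : (states.get? "o").getD 0 = 2 := by decide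
lemma states_m : (states.get? "m").getD 0 = 3 := by decide

lemma alt_state (l : List Int) :
    l.reverse.foldl
      (fun (acc : Option Int × List Int) x =>
        if x ≠ 1 then (some x, acc.2 ++ [x])
        else (acc.1, acc.2 ++ [if acc.1 = some 2 then 1 else 3]))
      (none, [])
    = (l.find? (fun y => y != 1), (tmap l).reverse) := by
  induction l with
  | nil => rfl
  | cons x l ih =>
    rw [List.reverse_cons, List.foldl_append, ih]
    by_cases hx : x = 1
    · simp [tmap, hx]
    · simp [tmap, hx]

lemma alt_eq_tmap (l : List Int) : StateTranslater_alt l = tmap l := by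
  show (l.reverse.foldl
      (fun (acc : Option Int × List Int) x =>
        if x ≠ 1 then (some x, acc.2 ++ [x])
        else (acc.1, acc.2 ++ [if acc.1 = some 2 then 1 else 3]))
      (none, [])).2.reverse = tmap l
  rw [alt_state]
  exact List.reverse_reverse _

lemma cnoc_eq (lzz : List Int) (c : Int) (i : Nat) :
    cnocLoop lzz c i
      = ((lzz.drop i).find? (fun y => y != c)).map (fun v => if v = 2 then 1 else 3) := by
  fun_induction cnocLoop lzz c i with
  | case1 i h hne ho =>
    rw [states_o] at ho
    rw [List.drop_eq_getElem_cons h, List.find?_cons_of_pos (by simpa using hne), states_M]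
    simp [ho]
  | case2 i h hne hno =>
    rw [states_o] at hno
    rw [List.drop_eq_getElem_cons h, List.find?_cons_of_pos (by simpa using hne), states_m]
    simp [hno]
  | case3 i h heq ih =>
    have heq' : lzz[i] = c := not_not.mp heq
    rw [ih, List.drop_eq_getElem_cons h, List.find?_cons_of_neg (by simp [heq'])]
  | case4 i h =>
    simp [List.drop_eq_nil_of_le (by omega : lzz.length ≤ i)]

lemma tail_find_some (lzz : List Int) (i : Nat) (h : i < lzz.length)
    (h1 : lzz[i] = 1) (hp : lzz.getLast? ≠ some 1) :
    ∃ v, (lzz.drop (i + 1)).find? (fun y => y != 1) = some v := by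
  have hlen : 0 < lzz.length := by omega
  have hlast : lzz[lzz.length - 1] ≠ 1 := by
    intro hc
    apply hp
    rw [List.getLast?_eq_getElem?]
    simp [List.getElem?_eq_getElem (by omega : lzz.length - 1 < lzz.length), hc]
  have hine : i ≠ lzz.length - 1 := by
    intro hie
    apply hlast
    have hq : lzz[lzz.length - 1]? = some 1 := by
      rw [← hie, List.getElem?_eq_getElem h, h1]
    simpa [List.getElem?_eq_getElem (by omega : lzz.length - 1 < lzz.length)] using hq
  have hmem : lzz[lzz.length - 1] ∈ lzz.drop (i + 1) := by
    have hg : (lzz.drop (i + 1))[lzz.length - 1 - (i + 1)]'(by simp; omega)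
        = lzz[lzz.length - 1] := by
      rw [List.getElem_drop]
      congr 1
      omega
    rw [← hg]
    exact List.getElem_mem _
  rcases hfind : (lzz.drop (i + 1)).find? (fun y => y != 1) with _ | v
  · exact absurd (by simpa using List.find?_eq_none.mp hfind _ hmem) hlast
  · exact ⟨v, rfl⟩

lemma stLoop_eq (lzz : List Int) (hp : lzz.getLast? ≠ some 1) (i : Nat) (result : List Int) :
    stLoop lzz i result = result ++ tmap (lzz.drop i) := by
  fun_induction stLoop lzz i result with
  | case1 i result h hne ih =>
    rw [states_M] at hne
    rw [ih, List.drop_eq_getElem_cons h]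
    simp [tmap, hne]
  | case2 i result h hM ih =>
    rw [states_M] at hM
    replace hM : lzz[i] = 1 := not_not.mp hM
    obtain ⟨v, hv⟩ := tail_find_some lzz i h hM hp
    have hc : (CheckNextObservationChange lzz i).getD 0 = if v = 2 then 1 else 3 := by
      rw [CheckNextObservationChange, List.getD_eq_getElem _ _ h, hM, cnoc_eq,
        List.drop_eq_getElem_cons h, List.find?_cons_of_neg (by simp [hM]), hv]
      rfl
    rw [hc] at ih ⊢
    rw [ih, List.drop_eq_getElem_cons h]
    simp [tmap, hM, hv]
  | case3 i result h =>
    rw [List.drop_eq_nil_of_le (by omega : lzz.length ≤ i)]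
    simp [tmap]

-- ===== VERDICT (by name: the statement is the Claim_ definition above) =====
theorem StateTranslater_spec : Claim_equal_StateTranslater := by
  intro lzz _ hpre
  show StateTranslater lzz = StateTranslater_alt lzz
  rw [StateTranslater, stLoop_eq lzz hpre 0, alt_eq_tmap]
  simp
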